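-- pv_equiv track=rewrite | github.com/jpritt/boiler | compareSAMs.py | conflicts
-- ===== SOURCE A (Python) =====
-- def conflicts(exonsA, exonsB):
--     '''
--         Returns true if any of the exons from A or B overlaps one of the introns from the other set of exons
--     '''
--
--     for e in exonsB:
--         if e[0] > exonsA[-1][0]:
--             break
--
--         for i in range(len(exonsA)-1):
--             if e[0] >= exonsA[-i-1][0]:
--                 break
--             elif e[1] > exonsA[-i-2][1]:
--                 # Exon in B overlaps an intron in A
--                 return 1
--
--     countA = len(exonsA)
--     for i in range(countA):
--         e = exonsA[countA-i-1]
--         if e[1] < exonsB[0][1]: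
--             break
--
--         for i in range(len(exonsB)-1):
--             if e[1] <= exonsB[i][1]:
--                 break
--             elif e[1] > exonsB[i][1] and e[0] < exonsB[i+1][0]:
--                 # Exon in A overlaps an intron in B
--                 return 2
--
--     return 0
-- ===== SOURCE B (Python) =====
-- def conflicts(exonsA, exonsB):
--     # Same decision as A, restructured: reverse A once, precompute running
--     # minima of A's end-coords and running maxima of B's start-coords, so each
--     # candidate exon needs only the break-point search plus one O(1) lookup.
--     revA = exonsA[::-1]
--     n = len(revA)
--
--     # pminA[m] = min end-coordinate among revA[1..m] (None for m = 0)
--     pminA = [None] * n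
--     cur = None
--     for k in range(1, n):
--         y = revA[k][1]
--         cur = y if cur is None or y < cur else cur
--         pminA[k] = cur
--
--     lastA0 = revA[0][0]
--     for e in exonsB:
--         if e[0] > lastA0:
--             break
--         m = next((i for i in range(n - 1) if e[0] >= revA[i][0]), n - 1)
--         if m > 0 and pminA[m] < e[1]:
--             return 1
--
--     nB = len(exonsB)
--     # pmaxB[k] = max start-coordinate among exonsB[1..k] (None for k = 0)
--     pmaxB = [None] * nB
--     cur = None
--     for k in range(1, nB):
--         x = exonsB[k][0]
--         cur = x if cur is None or x > cur else cur
--         pmaxB[k] = cur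
--
--     firstB1 = exonsB[0][1]
--     for e in revA:
--         if e[1] < firstB1:
--             break
--         k = next((i for i in range(nB - 1) if e[1] <= exonsB[i][1]), nB - 1)
--         if k > 0 and pmaxB[k] > e[0]:
--             return 2
--
--     return 0
-- ===== Notes on version B (the rewrite author's own statement) =====
-- stated objective: alternative
-- what changed: B reverses exonsA once and precomputes running minima of A's exon end-coordinates and running maxima of B's exon start-coordinates, so each candidate exon needs only the break-point search plus a single O(1) prefix-extremum lookup instead of A's interleaved inner rescan with break/return.
-- outside the precondition, e.g. on conflicts([(3,), (5, 6)], [(9, 9)]): A returns 0, B raises IndexError; on conflicts([(1, 2)], [(0, 3), (9,)]): A returns 0, B returns 0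
import Mathlib
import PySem

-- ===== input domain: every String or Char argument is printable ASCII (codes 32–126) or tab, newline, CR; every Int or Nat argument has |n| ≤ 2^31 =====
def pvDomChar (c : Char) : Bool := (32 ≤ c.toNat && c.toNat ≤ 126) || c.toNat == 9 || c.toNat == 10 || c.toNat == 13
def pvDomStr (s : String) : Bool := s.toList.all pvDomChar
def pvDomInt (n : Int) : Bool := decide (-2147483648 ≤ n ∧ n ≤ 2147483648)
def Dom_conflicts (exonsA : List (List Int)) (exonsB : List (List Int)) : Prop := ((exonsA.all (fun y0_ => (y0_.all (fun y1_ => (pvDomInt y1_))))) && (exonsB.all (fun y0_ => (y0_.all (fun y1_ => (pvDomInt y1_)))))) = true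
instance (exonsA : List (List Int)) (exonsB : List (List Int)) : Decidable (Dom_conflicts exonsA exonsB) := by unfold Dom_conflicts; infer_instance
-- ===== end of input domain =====

-- B reverses exonsA once and precomputes running minima of A's end-coordinates and
-- running maxima of B's start-coordinates, so each candidate exon needs only the
-- break-point search plus one O(1) prefix-extremum lookup instead of A's inner rescan.

-- shared element accessors: e[j] / xs[i] with Python index semantics (exact in range,
-- which Pre_ guarantees; a junk default out of range, reached only outside Pre_)
def gI (e : List Int) (j : Int) : Int := (PySem.List.pyGet? e j).getD 0
def gL (xs : List (List Int)) (i : Int) : List Int := (PySem.List.pyGet? xs i).getD []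

-- ===== PORT A =====
-- inner loop of part 1: 'for i in range(len(exonsA)-1)', walking exonsA from the end
def innerA (exonsA : List (List Int)) (e : List Int) : Nat → Nat → Bool
  | _, 0 => false
  | i, fuel+1 =>
    if gI e 0 ≥ gI (gL exonsA (-(i:Int)-1)) 0 then false
    else if gI e 1 > gI (gL exonsA (-(i:Int)-2)) 1 then true
    else innerA exonsA e (i+1) fuel

-- outer loop of part 1: 'for e in exonsB' with break / return 1
def loop1A (exonsA : List (List Int)) : List (List Int) → Bool
  | [] => false
  | e :: rest =>
    if gI e 0 > gI (gL exonsA (-1)) 0 then false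
    else if innerA exonsA e 0 (exonsA.length - 1) then true
    else loop1A exonsA rest

-- inner loop of part 2: 'for i in range(len(exonsB)-1)'
def inner2A (exonsB : List (List Int)) (e : List Int) : Nat → Nat → Bool
  | _, 0 => false
  | i, fuel+1 =>
    if gI e 1 ≤ gI (gL exonsB (i:Int)) 1 then false
    else if gI e 1 > gI (gL exonsB (i:Int)) 1 ∧ gI e 0 < gI (gL exonsB ((i:Int)+1)) 0 then true
    else inner2A exonsB e (i+1) fuel

-- outer loop of part 2: 'for i in range(countA)' with e = exonsA[countA-i-1]
def loop2A (exonsA exonsB : List (List Int)) (countA : Nat) : Nat → Nat → Bool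
  | _, 0 => false
  | i, fuel+1 =>
    let e := gL exonsA ((countA:Int)-(i:Int)-1)
    if gI e 1 < gI (gL exonsB 0) 1 then false
    else if inner2A exonsB e 0 (exonsB.length - 1) then true
    else loop2A exonsA exonsB countA (i+1) fuel

def conflicts (exonsA : List (List Int)) (exonsB : List (List Int)) : Int :=
  if loop1A exonsA exonsB then 1
  else if loop2A exonsA exonsB exonsA.length 0 exonsA.length then 2
  else 0

-- ===== PORT B =====
-- running minimum of end-coordinates: pminA[k] entries for k = 1..n-1
def minScanB : Option Int → List (List Int) → List (Option Int)
  | _, [] => []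
  | cur, x :: rest =>
    let y := gI x 1
    let c := match cur with | none => y | some c => if y < c then y else c
    some c :: minScanB (some c) rest

-- running maximum of start-coordinates: pmaxB[k] entries for k = 1..nB-1
def maxScanB : Option Int → List (List Int) → List (Option Int)
  | _, [] => []
  | cur, x :: rest =>
    let v := gI x 0
    let c := match cur with | none => v | some c => if v > c then v else c
    some c :: maxScanB (some c) rest

-- m = next((i for i in range(n-1) if e[0] >= revA[i][0]), n-1)
def brkIdx1 (revA : List (List Int)) (e0 : Int) : Nat :=
  ((revA.take (revA.length - 1)).findIdx? (fun x => e0 ≥ gI x 0)).getD (revA.length - 1)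

def hitB1 (revA : List (List Int)) (pminA : List (Option Int)) (e : List Int) : Bool :=
  let m := brkIdx1 revA (gI e 0)
  if 0 < m then
    match pminA.getD m none with
    | some v => v < gI e 1
    | none => false
  else false

def loopB1 (revA : List (List Int)) (pminA : List (Option Int)) (lastA0 : Int) :
    List (List Int) → Bool
  | [] => false
  | e :: rest =>
    if gI e 0 > lastA0 then false
    else if hitB1 revA pminA e then true
    else loopB1 revA pminA lastA0 rest

-- k = next((i for i in range(nB-1) if e[1] <= exonsB[i][1]), nB-1)
def brkIdx2 (exonsB : List (List Int)) (e1 : Int) : Nat :=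
  ((exonsB.take (exonsB.length - 1)).findIdx? (fun x => e1 ≤ gI x 1)).getD (exonsB.length - 1)

def hitB2 (exonsB : List (List Int)) (pmaxB : List (Option Int)) (e : List Int) : Bool :=
  let k := brkIdx2 exonsB (gI e 1)
  if 0 < k then
    match pmaxB.getD k none with
    | some v => v > gI e 0
    | none => false
  else false

def loopB2 (exonsB : List (List Int)) (pmaxB : List (Option Int)) (firstB1 : Int) :
    List (List Int) → Bool
  | [] => false
  | e :: rest =>
    if gI e 1 < firstB1 then false
    else if hitB2 exonsB pmaxB e then true
    else loopB2 exonsB pmaxB firstB1 rest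

def conflicts_alt (exonsA : List (List Int)) (exonsB : List (List Int)) : Int :=
  let revA := (PySem.List.slice? exonsA none none (-1)).getD []   -- exonsA[::-1]
  let pminA : List (Option Int) := none :: minScanB none revA.tail
  if loopB1 revA pminA (gI (revA.getD 0 []) 0) exonsB then 1
  else
    let pmaxB : List (Option Int) := none :: maxScanB none exonsB.tail
    if loopB2 exonsB pmaxB (gI (exonsB.getD 0 []) 1) revA then 2
    else 0

-- ===== PRECONDITION & SPEC =====
-- Pre_ restricts to the function's natural domain: nonempty exon lists whose exons are
-- [start, end] pairs (length ≥ 2). A raises IndexError on empty inputs and on malformed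
-- exons its scans reach; on a few malformed inputs A happens to return before reaching
-- the short exon while B (which precomputes over all exons) raises — excluded here.
def Pre_conflicts (exonsA : List (List Int)) (exonsB : List (List Int)) : Prop :=
  exonsA ≠ [] ∧ exonsB ≠ [] ∧ (∀ e ∈ exonsA, 2 ≤ e.length) ∧ (∀ e ∈ exonsB, 2 ≤ e.length)
instance (exonsA : List (List Int)) (exonsB : List (List Int)) : Decidable (Pre_conflicts exonsA exonsB) := by
  unfold Pre_conflicts; infer_instance

def pvWitness_conflicts : List (List Int) × List (List Int) := ([[1, 5], [10, 14]], [[2, 12]])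

def Spec_conflicts (exonsA : List (List Int)) (exonsB : List (List Int)) (out : Int) : Prop := out = conflicts_alt exonsA exonsB
instance (exonsA : List (List Int)) (exonsB : List (List Int)) (out : Int) : Decidable (Spec_conflicts exonsA exonsB out) := by unfold Spec_conflicts; infer_instance

-- ===== CLAIM (what is proved, stated in full; the proofs are below) =====
def Claim_equal_conflicts : Prop := ∀ (exonsA : List (List Int)) (exonsB : List (List Int)), Dom_conflicts exonsA exonsB → Pre_conflicts exonsA exonsB → Spec_conflicts exonsA exonsB (conflicts exonsA exonsB)

-- ===== LEMMAS AND PROOFS =====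

-- common shape of both inner scans of part 1, walking adjacent pairs of revA
def scan1 (e0 e1 : Int) : List (List Int) → Bool
  | [] => false
  | [_] => false
  | x :: y :: rest =>
    if e0 ≥ gI x 0 then false
    else if e1 > gI y 1 then true
    else scan1 e0 e1 (y :: rest)

-- common shape of both inner scans of part 2, walking adjacent pairs of exonsB
def scan2 (e0 e1 : Int) : List (List Int) → Bool
  | [] => false
  | [_] => false
  | x :: y :: rest =>
    if e1 ≤ gI x 1 then false
    else if e1 > gI x 1 ∧ e0 < gI y 0 then true
    else scan2 e0 e1 (y :: rest)

def optLt (e1 : Int) : Option Int → Bool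
  | some v => v < e1
  | none => false

def optGt (e0 : Int) : Option Int → Bool
  | some v => v > e0
  | none => false

def mn (y c : Int) : Int := if y < c then y else c
def mx (v c : Int) : Int := if v > c then v else c

theorem gL_neg (xs : List (List Int)) (i : Nat) :
    gL xs (-(i:Int)-1) = xs.reverse.getD i [] := by
  unfold gL
  by_cases h : i < xs.length
  · have hk : (-(i:Int)-1) = -(((i+1:Nat)):Int) := by push_cast; ring
    rw [hk, PySem.List.pyGet?_neg_natCast _ _ (by omega) (by omega)]
    rw [List.getD_eq_getElem?_getD, List.getElem?_reverse h]
    have : xs.length - (i+1) = xs.length - 1 - i := by omega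
    rw [this]
  · rw [(PySem.List.pyGet?_eq_none_iff _ _).2 (by unfold PySem.Raise.InRange; omega)]
    rw [List.getD_eq_getElem?_getD, List.getElem?_eq_none (by simp; omega)]

theorem gL_pos_rev (xs : List (List Int)) (i : Nat) (h : i < xs.length) :
    gL xs ((xs.length:Int)-(i:Int)-1) = xs.reverse.getD i [] := by
  unfold gL
  have hk : ((xs.length:Int)-(i:Int)-1) = ((xs.length - 1 - i : Nat) : Int) := by omega
  rw [hk, PySem.List.pyGet?_natCast]
  rw [List.getD_eq_getElem?_getD, List.getElem?_reverse h]

theorem innerA_eq_scan1 (exonsA : List (List Int)) (e : List Int) :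
    ∀ fuel i, i + fuel + 1 = exonsA.length →
      innerA exonsA e i fuel = scan1 (gI e 0) (gI e 1) (exonsA.reverse.drop i) := by
  intro fuel
  induction fuel with
  | zero =>
    intro i hi
    have hlen : (exonsA.reverse.drop i).length = 1 := by simp; omega
    rcases hd : exonsA.reverse.drop i with _ | ⟨x, t⟩
    · simp [hd] at hlen
    · rcases t with _ | ⟨y, t'⟩
      · simp [innerA, scan1]
      · simp [hd] at hlen
  | succ fuel ih =>
    intro i hi
    have h1 : i < exonsA.reverse.length := by simp; omega
    have h2 : i + 1 < exonsA.reverse.length := by simp; omega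
    have hd : exonsA.reverse.drop i =
        exonsA.reverse[i] :: exonsA.reverse[i+1] :: exonsA.reverse.drop (i+2) := by
      rw [List.drop_eq_getElem_cons h1, List.drop_eq_getElem_cons h2]
    have g1 : gL exonsA (-(i:Int)-1) = exonsA.reverse[i] := by
      rw [gL_neg]; rw [List.getD_eq_getElem?_getD, List.getElem?_eq_getElem h1]; rfl
    have g2 : gL exonsA (-(i:Int)-2) = exonsA.reverse[i+1] := by
      have : (-(i:Int)-2) = (-((i+1:Nat):Int)-1) := by push_cast; ring
      rw [this, gL_neg]; rw [List.getD_eq_getElem?_getD, List.getElem?_eq_getElem h2]; rfl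
    rw [hd]
    show innerA exonsA e i (fuel+1) = _
    rw [innerA, g1, g2]
    simp only [scan1]
    split
    · rfl
    · split
      · rfl
      · have := ih (i+1) (by omega)
        rw [this]
        rw [List.drop_eq_getElem_cons h2]

theorem inner2A_eq_scan2 (exonsB : List (List Int)) (e : List Int) :
    ∀ fuel i, i + fuel + 1 = exonsB.length →
      inner2A exonsB e i fuel = scan2 (gI e 0) (gI e 1) (exonsB.drop i) := by
  intro fuel
  induction fuel with
  | zero =>
    intro i hi
    have hlen : (exonsB.drop i).length = 1 := by simp; omega
    rcases hd : exonsB.drop i with _ | ⟨x, t⟩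
    · simp [hd] at hlen
    · rcases t with _ | ⟨y, t'⟩
      · simp [inner2A, scan2]
      · simp [hd] at hlen
  | succ fuel ih =>
    intro i hi
    have h1 : i < exonsB.length := by omega
    have h2 : i + 1 < exonsB.length := by omega
    have hd : exonsB.drop i = exonsB[i] :: exonsB[i+1] :: exonsB.drop (i+2) := by
      rw [List.drop_eq_getElem_cons h1, List.drop_eq_getElem_cons h2]
    have g1 : gL exonsB (i:Int) = exonsB[i] := by
      unfold gL; rw [PySem.List.pyGet?_natCast, List.getElem?_eq_getElem h1]; rfl
    have g2 : gL exonsB ((i:Int)+1) = exonsB[i+1] := by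
      unfold gL
      have : ((i:Int)+1) = ((i+1:Nat):Int) := by push_cast; ring
      rw [this, PySem.List.pyGet?_natCast, List.getElem?_eq_getElem h2]; rfl
    rw [hd]
    show inner2A exonsB e i (fuel+1) = _
    rw [inner2A, g1, g2]
    simp only [scan2]
    split
    · rfl
    · split
      · rfl
      · have := ih (i+1) (by omega)
        rw [this]
        rw [List.drop_eq_getElem_cons h2]

theorem minScanB_none_cons (x : List Int) (rest : List (List Int)) :
    minScanB none (x :: rest) = some (gI x 1) :: minScanB (some (gI x 1)) rest := rfl

theorem minScanB_some_cons (c : Int) (x : List Int) (rest : List (List Int)) :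
    minScanB (some c) (x :: rest) =
      some (mn (gI x 1) c) :: minScanB (some (mn (gI x 1) c)) rest := rfl

theorem maxScanB_none_cons (x : List Int) (rest : List (List Int)) :
    maxScanB none (x :: rest) = some (gI x 0) :: maxScanB (some (gI x 0)) rest := rfl

theorem maxScanB_some_cons (c : Int) (x : List Int) (rest : List (List Int)) :
    maxScanB (some c) (x :: rest) =
      some (mx (gI x 0) c) :: maxScanB (some (mx (gI x 0) c)) rest := rfl

theorem hitB1_def' (rev : List (List Int)) (p : List (Option Int)) (e : List Int) :
    hitB1 rev p e =
      if 0 < brkIdx1 rev (gI e 0) then optLt (gI e 1) (p.getD (brkIdx1 rev (gI e 0)) none)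
      else false := by
  unfold hitB1 optLt
  cases hp : p.getD (brkIdx1 rev (gI e 0)) none <;> simp only [hp]

theorem hitB2_def' (B : List (List Int)) (p : List (Option Int)) (e : List Int) :
    hitB2 B p e =
      if 0 < brkIdx2 B (gI e 1) then optGt (gI e 0) (p.getD (brkIdx2 B (gI e 1)) none)
      else false := by
  unfold hitB2 optGt
  cases hp : p.getD (brkIdx2 B (gI e 1)) none <;> simp only [hp]

theorem brk1_le (l : List (List Int)) (e0 : Int) : brkIdx1 l e0 ≤ l.length - 1 := by
  unfold brkIdx1
  rcases h : (l.take (l.length - 1)).findIdx? (fun x => e0 ≥ gI x 0) with _ | k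
  · simp
  · have := (List.findIdx?_eq_some_iff_findIdx_eq.1 h).1
    simp at this
    simp
    omega

theorem brk2_le (l : List (List Int)) (e1 : Int) : brkIdx2 l e1 ≤ l.length - 1 := by
  unfold brkIdx2
  rcases h : (l.take (l.length - 1)).findIdx? (fun x => e1 ≤ gI x 1) with _ | k
  · simp
  · have := (List.findIdx?_eq_some_iff_findIdx_eq.1 h).1
    simp at this
    simp
    omega

theorem brk1_cons (x y : List Int) (rest : List (List Int)) (e0 : Int) :
    brkIdx1 (x :: y :: rest) e0 =
      if e0 ≥ gI x 0 then 0 else brkIdx1 (y :: rest) e0 + 1 := by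
  unfold brkIdx1
  have h1 : (x :: y :: rest).length - 1 = rest.length + 1 := by simp
  have h2 : (y :: rest).length - 1 = rest.length := by simp
  rw [h1, h2]
  rw [List.take_succ_cons, List.findIdx?_cons]
  by_cases h0 : e0 ≥ gI x 0
  · simp [h0]
  · rcases h : ((y :: rest).take rest.length).findIdx? (fun x => decide (e0 ≥ gI x 0)) with _ | k <;>
      simp [h0]

theorem brk2_cons (x y : List Int) (rest : List (List Int)) (e1 : Int) :
    brkIdx2 (x :: y :: rest) e1 =
      if e1 ≤ gI x 1 then 0 else brkIdx2 (y :: rest) e1 + 1 := by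
  unfold brkIdx2
  have h1 : (x :: y :: rest).length - 1 = rest.length + 1 := by simp
  have h2 : (y :: rest).length - 1 = rest.length := by simp
  rw [h1, h2]
  rw [List.take_succ_cons, List.findIdx?_cons]
  by_cases h0 : e1 ≤ gI x 1
  · simp [h0]
  · rcases h : ((y :: rest).take rest.length).findIdx? (fun x => decide (e1 ≤ gI x 1)) with _ | k <;>
      simp [h0]

theorem ms_bound : ∀ (t : List (List Int)) (c : Int) (j : Nat), j < t.length →
    ∃ v, (minScanB (some c) t).getD j none = some v ∧ v ≤ c := by
  intro t
  induction t with
  | nil => intro c j h; simp at h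
  | cons a t ih =>
    intro c j h
    rw [minScanB_some_cons]
    cases j with
    | zero => exact ⟨mn (gI a 1) c, rfl, by unfold mn; split <;> omega⟩
    | succ j =>
      obtain ⟨v, hv, hle⟩ := ih (mn (gI a 1) c) j (by simp at h; omega)
      refine ⟨v, hv, ?_⟩
      unfold mn at hle
      split at hle <;> omega

theorem mx_bound : ∀ (t : List (List Int)) (c : Int) (j : Nat), j < t.length →
    ∃ v, (maxScanB (some c) t).getD j none = some v ∧ c ≤ v := by
  intro t
  induction t with
  | nil => intro c j h; simp at h
  | cons a t ih =>
    intro c j h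
    rw [maxScanB_some_cons]
    cases j with
    | zero => exact ⟨mx (gI a 0) c, rfl, by unfold mx; split <;> omega⟩
    | succ j =>
      obtain ⟨v, hv, hle⟩ := ih (mx (gI a 0) c) j (by simp at h; omega)
      refine ⟨v, hv, ?_⟩
      unfold mx at hle
      split at hle <;> omega

theorem ms_shift (e1 : Int) : ∀ (t : List (List Int)) (d c : Int) (j : Nat), e1 ≤ c →
    optLt e1 ((minScanB (some (mn d c)) t).getD j none)
      = optLt e1 ((minScanB (some d) t).getD j none) := by
  intro t
  induction t with
  | nil => intros; rfl
  | cons a t ih =>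
    intro d c j hc
    rw [minScanB_some_cons, minScanB_some_cons]
    cases j with
    | zero =>
      simp only [List.getD_cons_zero, optLt]
      have : (mn (gI a 1) (mn d c) < e1) ↔ (mn (gI a 1) d < e1) := by
        unfold mn; split_ifs <;> omega
      simp [this]
    | succ j =>
      simp only [List.getD_cons_succ]
      have hm : mn (gI a 1) (mn d c) = mn (mn (gI a 1) d) c := by
        unfold mn; split_ifs <;> omega
      rw [hm, ih (mn (gI a 1) d) c j hc]

theorem mx_shift (e0 : Int) : ∀ (t : List (List Int)) (d c : Int) (j : Nat), c ≤ e0 →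
    optGt e0 ((maxScanB (some (mx d c)) t).getD j none)
      = optGt e0 ((maxScanB (some d) t).getD j none) := by
  intro t
  induction t with
  | nil => intros; rfl
  | cons a t ih =>
    intro d c j hc
    rw [maxScanB_some_cons, maxScanB_some_cons]
    cases j with
    | zero =>
      simp only [List.getD_cons_zero, optGt]
      have : (mx (gI a 0) (mx d c) > e0) ↔ (mx (gI a 0) d > e0) := by
        unfold mx; split_ifs <;> omega
      simp [this]
    | succ j =>
      simp only [List.getD_cons_succ]
      have hm : mx (gI a 0) (mx d c) = mx (mx (gI a 0) d) c := by
        unfold mx; split_ifs <;> omega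
      rw [hm, ih (mx (gI a 0) d) c j hc]

theorem ms_drop (e1 c : Int) (hc : e1 ≤ c) : ∀ (t : List (List Int)) (j : Nat),
    optLt e1 ((minScanB (some c) t).getD j none)
      = optLt e1 ((minScanB none t).getD j none) := by
  intro t
  cases t with
  | nil => intro j; rfl
  | cons a t =>
    intro j
    rw [minScanB_some_cons, minScanB_none_cons]
    cases j with
    | zero =>
      simp only [List.getD_cons_zero, optLt]
      have : (mn (gI a 1) c < e1) ↔ (gI a 1 < e1) := by unfold mn; split_ifs <;> omega
      simp [this]
    | succ j =>
      simp only [List.getD_cons_succ]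
      exact ms_shift e1 t (gI a 1) c j hc

theorem mx_drop (e0 c : Int) (hc : c ≤ e0) : ∀ (t : List (List Int)) (j : Nat),
    optGt e0 ((maxScanB (some c) t).getD j none)
      = optGt e0 ((maxScanB none t).getD j none) := by
  intro t
  cases t with
  | nil => intro j; rfl
  | cons a t =>
    intro j
    rw [maxScanB_some_cons, maxScanB_none_cons]
    cases j with
    | zero =>
      simp only [List.getD_cons_zero, optGt]
      have : (mx (gI a 0) c > e0) ↔ (gI a 0 > e0) := by unfold mx; split_ifs <;> omega
      simp [this]
    | succ j =>
      simp only [List.getD_cons_succ]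
      exact mx_shift e0 t (gI a 0) c j hc

theorem hit1_cons (x y : List Int) (rest : List (List Int)) (e : List Int) :
    hitB1 (x :: y :: rest) (none :: minScanB none (y :: rest)) e =
      if gI e 0 ≥ gI x 0 then false
      else if gI e 1 > gI y 1 then true
      else hitB1 (y :: rest) (none :: minScanB none rest) e := by
  rw [hitB1_def', hitB1_def', brk1_cons]
  split
  · simp
  · simp only [Nat.zero_lt_succ, if_true, List.getD_cons_succ]
    rw [minScanB_none_cons]
    rcases hm : brkIdx1 (y :: rest) (gI e 0) with _ | j
    · simp only [List.getD_cons_zero, optLt]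
      split
      · simp; omega
      · simp; omega
    · simp only [List.getD_cons_succ, Nat.zero_lt_succ, if_true]
      split
      · have hb := brk1_le (y :: rest) (gI e 0)
        rw [hm] at hb
        simp at hb
        obtain ⟨v, hv, hle⟩ := ms_bound rest (gI y 1) j (by omega)
        rw [hv]
        simp [optLt]
        omega
      · have h1 : ¬ (gI e 1 > gI y 1) := by assumption
        exact ms_drop (gI e 1) (gI y 1) (by omega) rest j

theorem hit2_cons (x y : List Int) (rest : List (List Int)) (e : List Int) :
    hitB2 (x :: y :: rest) (none :: maxScanB none (y :: rest)) e =
      if gI e 1 ≤ gI x 1 then false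
      else if gI e 1 > gI x 1 ∧ gI e 0 < gI y 0 then true
      else hitB2 (y :: rest) (none :: maxScanB none rest) e := by
  rw [hitB2_def', hitB2_def', brk2_cons]
  split
  · simp
  · have hx1 : ¬ (gI e 1 ≤ gI x 1) := by assumption
    simp only [Nat.zero_lt_succ, if_true, List.getD_cons_succ]
    rw [maxScanB_none_cons]
    rcases hm : brkIdx2 (y :: rest) (gI e 1) with _ | j
    · simp only [List.getD_cons_zero, optGt]
      split
      · simp; omega
      · simp; omega
    · simp only [List.getD_cons_succ, Nat.zero_lt_succ, if_true]
      split
      · rename_i hty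
        have hb := brk2_le (y :: rest) (gI e 1)
        rw [hm] at hb
        simp at hb
        obtain ⟨v, hv, hle⟩ := mx_bound rest (gI y 0) j (by omega)
        rw [hv]
        simp [optGt]
        omega
      · rename_i hty
        have h0 : gI y 0 ≤ gI e 0 := by
          by_contra hcon
          exact hty ⟨by omega, by omega⟩
        exact mx_drop (gI e 0) (gI y 0) h0 rest j

theorem hitB1_eq_scan1 (e : List Int) : ∀ (rev : List (List Int)),
    hitB1 rev (none :: minScanB none rev.tail) e = scan1 (gI e 0) (gI e 1) rev := by
  intro rev
  induction rev with
  | nil => rfl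
  | cons x t ih =>
    cases t with
    | nil => rfl
    | cons y rest =>
      have ht : (x :: y :: rest).tail = y :: rest := rfl
      rw [ht, hit1_cons]
      simp only [scan1]
      split
      · rfl
      · split
        · rfl
        · exact ih

theorem hitB2_eq_scan2 (e : List Int) : ∀ (B : List (List Int)),
    hitB2 B (none :: maxScanB none B.tail) e = scan2 (gI e 0) (gI e 1) B := by
  intro B
  induction B with
  | nil => rfl
  | cons x t ih =>
    cases t with
    | nil => rfl
    | cons y rest =>
      have ht : (x :: y :: rest).tail = y :: rest := rfl
      rw [ht, hit2_cons]
      simp only [scan2]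
      split
      · rfl
      · split
        · rfl
        · exact ih

-- pointwise: A's part-1 inner loop equals B's prefix-minimum test
theorem inner_eq_hit1 (exonsA : List (List Int)) (e : List Int) :
    innerA exonsA e 0 (exonsA.length - 1)
      = hitB1 exonsA.reverse (none :: minScanB none exonsA.reverse.tail) e := by
  rw [hitB1_eq_scan1]
  cases exonsA with
  | nil => rfl
  | cons a t =>
    have := innerA_eq_scan1 (a :: t) e ((a :: t).length - 1) 0 (by simp)
    simpa using this

-- pointwise: A's part-2 inner loop equals B's prefix-maximum test
theorem inner_eq_hit2 (exonsB : List (List Int)) (e : List Int) :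
    inner2A exonsB e 0 (exonsB.length - 1)
      = hitB2 exonsB (none :: maxScanB none exonsB.tail) e := by
  rw [hitB2_eq_scan2]
  cases exonsB with
  | nil => rfl
  | cons a t =>
    have := inner2A_eq_scan2 (a :: t) e ((a :: t).length - 1) 0 (by simp)
    simpa using this

theorem lastA0_eq (exonsA : List (List Int)) :
    gI (gL exonsA (-1)) 0 = gI (exonsA.reverse.getD 0 []) 0 := by
  have : (-1 : Int) = -((0:Nat):Int)-1 := by simp
  rw [this, gL_neg]

theorem firstB_eq (exonsB : List (List Int)) : gL exonsB 0 = exonsB.getD 0 [] := by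
  unfold gL
  rw [PySem.List.pyGet?_zero, List.getD_eq_getElem?_getD]

theorem loop1_eq (exonsA : List (List Int)) : ∀ (Bs : List (List Int)),
    loop1A exonsA Bs
      = loopB1 exonsA.reverse (none :: minScanB none exonsA.reverse.tail)
          (gI (exonsA.reverse.getD 0 []) 0) Bs := by
  intro Bs
  induction Bs with
  | nil => rfl
  | cons e rest ih =>
    rw [loop1A, loopB1, lastA0_eq, inner_eq_hit1, ih]

theorem loop2_eq (exonsA exonsB : List (List Int)) :
    ∀ fuel i, i + fuel = exonsA.length →
      loop2A exonsA exonsB exonsA.length i fuel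
        = loopB2 exonsB (none :: maxScanB none exonsB.tail)
            (gI (exonsB.getD 0 []) 1) (exonsA.reverse.drop i) := by
  intro fuel
  induction fuel with
  | zero =>
    intro i hi
    have : exonsA.reverse.drop i = [] := by
      apply List.drop_eq_nil_of_le
      simp
      omega
    rw [this]
    rfl
  | succ fuel ih =>
    intro i hi
    have h1 : i < exonsA.reverse.length := by simp; omega
    have hd : exonsA.reverse.drop i = exonsA.reverse[i] :: exonsA.reverse.drop (i+1) :=
      List.drop_eq_getElem_cons h1
    have ge : gL exonsA ((exonsA.length:Int)-(i:Int)-1) = exonsA.reverse[i] := by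
      rw [gL_pos_rev exonsA i (by simpa using h1)]
      rw [List.getD_eq_getElem?_getD, List.getElem?_eq_getElem h1]
      rfl
    rw [hd]
    show loop2A exonsA exonsB exonsA.length i (fuel+1) = _
    rw [loop2A]
    simp only [ge, firstB_eq, loopB2]
    split
    · rfl
    · rw [inner_eq_hit2]
      split
      · rfl
      · exact ih (i+1) (by omega)

-- ===== VERDICT (by name: the statement is the Claim_ definition above) =====
theorem conflicts_spec : Claim_equal_conflicts := by
  intro exonsA exonsB _ _
  unfold Spec_conflicts conflicts conflicts_alt
  rw [PySem.List.slice?_none_none_neg_one]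
  simp only [Option.getD_some]
  rw [loop1_eq]
  split
  · rfl
  · rw [loop2_eq exonsA exonsB exonsA.length 0 (by omega)]
    rfl
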